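-- pv_equiv track=rewrite | github.com/potocnikales/advent-of-code | day9.py | _search_contiguous
-- ===== SOURCE A (Python) =====
-- def _search_contiguous(arr, target_sum, r):
--     _contiguous_list = [0]
--     n = len(arr)
--     start = 0
--     curr_sum = arr[0]
--     index = 1
--     i = 1
--     while i <= n:
--         if curr_sum == target_sum and index == r:
--             _contiguous_list = arr[i-r:i]
--         while index >= r:
--             curr_sum -= arr[start]
--             start += 1
--             index = r-1
--         if i < n:
--             curr_sum += arr[i]
--             index += 1
--         i += 1
--
--     return min(_contiguous_list) + max(_contiguous_list)
-- ===== SOURCE B (Python) =====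
-- def _search_contiguous(arr, target_sum, r):
--     prefix = [0]
--     for x in arr:
--         prefix.append(prefix[-1] + x)
--     result = [0]
--     for i in range(r, len(arr) + 1):
--         if prefix[i] - prefix[i - r] == target_sum:
--             result = arr[i - r:i]
--     return min(result) + max(result)
-- ===== Notes on version B (the rewrite author's own statement) =====
-- stated objective: simpler
-- what changed: Replaces A's sliding-window state machine (curr_sum/start/index bookkeeping with a reset inner while-loop) by a prefix-sum array and a single range loop that tests each window of length r directly, keeping the last match (less per-element work).
-- outside the precondition, e.g. on _search_contiguous([1], 5, -1): A returns 0, B raises IndexError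
import Mathlib
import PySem

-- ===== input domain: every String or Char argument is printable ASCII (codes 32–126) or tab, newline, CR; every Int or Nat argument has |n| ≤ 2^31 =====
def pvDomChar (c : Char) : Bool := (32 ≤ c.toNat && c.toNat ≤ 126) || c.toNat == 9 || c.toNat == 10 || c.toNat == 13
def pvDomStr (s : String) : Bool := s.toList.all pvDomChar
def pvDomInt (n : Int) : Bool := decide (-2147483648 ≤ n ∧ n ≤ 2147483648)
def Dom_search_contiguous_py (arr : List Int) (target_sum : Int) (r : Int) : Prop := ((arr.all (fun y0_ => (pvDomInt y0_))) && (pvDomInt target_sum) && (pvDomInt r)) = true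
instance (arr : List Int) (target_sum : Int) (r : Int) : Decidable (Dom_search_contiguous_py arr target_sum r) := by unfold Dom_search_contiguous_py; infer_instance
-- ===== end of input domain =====

-- B replaces A's sliding-window state machine by a prefix-sum array with one direct
-- window test per position (objective: simpler; same O(n) cost).

-- ===== PORT A =====
-- inner 'while index >= r' loop of A; the body sets index to r-1 < r, so it runs at most once,
-- which gives the decreasing measure. arr[start] is in range on every input admitted by
-- Pre_search_contiguous_py, so the .getD 0 default of pyGetD is never taken there.
def pvInnerA (arr : List Int) (r cs start index : Int) : Int × Int × Int :=
  if h : r ≤ index then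
    pvInnerA arr r (cs - PySem.List.pyGetD arr start 0) (start + 1) (r - 1)
  else (cs, start, index)
termination_by (if r ≤ index then 1 else 0)
decreasing_by simp [h, show ¬ r ≤ r - 1 by omega]

-- outer 'while i <= n' loop of A, state (_contiguous_list, curr_sum, start, index), i counts up
def pvLoopA (arr : List Int) (target_sum r : Int) (n : Nat) (i : Nat)
    (cl : List Int) (cs start index : Int) : List Int :=
  if i ≤ n then
    let cl' := if cs = target_sum ∧ index = r
               then PySem.List.slice arr (some ((i : Int) - r)) (some (i : Int)) else cl
    let p := pvInnerA arr r cs start index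
    let cs2 := if (i : Int) < (n : Int) then p.1 + PySem.List.pyGetD arr (i : Int) 0 else p.1
    let ix2 := if (i : Int) < (n : Int) then p.2.2 + 1 else p.2.2
    pvLoopA arr target_sum r n (i + 1) cl' cs2 p.2.1 ix2
  else cl
termination_by n + 1 - i

-- min/max of _contiguous_list: nonempty on every input admitted by Pre_, so .getD 0 is never taken there
def search_contiguous_py (arr : List Int) (target_sum : Int) (r : Int) : Int :=
  let cl := pvLoopA arr target_sum r arr.length 1 [0] (PySem.List.pyGetD arr 0 0) 0 1
  (PySem.List.min? cl (fun x => x)).getD 0 + (PySem.List.max? cl (fun x => x)).getD 0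

-- ===== PORT B =====
-- prefix = [0]; for x in arr: prefix.append(prefix[-1] + x)
def pvPrefixB (arr : List Int) : List Int :=
  arr.foldl (fun p x => p ++ [PySem.List.pyGetD p (-1) 0 + x]) [0]

def search_contiguous_py_alt (arr : List Int) (target_sum : Int) (r : Int) : Int :=
  let pfx := pvPrefixB arr
  let result := (PySem.List.pyRange r ((arr.length : Int) + 1) 1).foldl
    (fun result i =>
      if PySem.List.pyGetD pfx i 0 - PySem.List.pyGetD pfx (i - r) 0 = target_sum
      then PySem.List.slice arr (some (i - r)) (some i) else result) [0]
  (PySem.List.min? result (fun x => x)).getD 0 + (PySem.List.max? result (fun x => x)).getD 0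

-- ===== PRECONDITION & SPEC =====
-- Pre_ excludes the empty list, on which A raises IndexError at arr[0], and window lengths
-- r ≤ 0, a meaningless request on which A either raises ValueError (min of an empty slice)
-- or returns the untouched default 0 by accident of its leftover loop state.
def Pre_search_contiguous_py (arr : List Int) (target_sum : Int) (r : Int) : Prop :=
  arr ≠ [] ∧ 1 ≤ r
instance (arr : List Int) (target_sum : Int) (r : Int) : Decidable (Pre_search_contiguous_py arr target_sum r) := by unfold Pre_search_contiguous_py; infer_instance

def pvWitness_search_contiguous_py : List Int × Int × Int := ([1, 2, 3, 4], 5, 2)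

def Spec_search_contiguous_py (arr : List Int) (target_sum : Int) (r : Int) (out : Int) : Prop := out = search_contiguous_py_alt arr target_sum r
instance (arr : List Int) (target_sum : Int) (r : Int) (out : Int) : Decidable (Spec_search_contiguous_py arr target_sum r out) := by unfold Spec_search_contiguous_py; infer_instance

-- ===== CLAIM (what is proved, stated in full; the proofs are below) =====
def Claim_equal_search_contiguous_py : Prop := ∀ (arr : List Int) (target_sum : Int) (r : Int), Dom_search_contiguous_py arr target_sum r → Pre_search_contiguous_py arr target_sum r → Spec_search_contiguous_py arr target_sum r (search_contiguous_py arr target_sum r)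

-- ===== LEMMAS AND PROOFS =====

-- prefix sum S k = sum of the first k elements (k clamped to [0, len])
def pvS (arr : List Int) (k : Int) : Int := (arr.take k.toNat).sum

-- the common "last matching window" fold both ports reduce to
def pvG (arr : List Int) (target_sum r : Int) (cl : List Int) (i : Int) : List Int :=
  if r ≤ i ∧ pvS arr i - pvS arr (i - r) = target_sum
  then PySem.List.slice arr (some (i - r)) (some i) else cl

theorem pvInnerA_pos (arr : List Int) (r cs start index : Int) (h : r ≤ index) :
    pvInnerA arr r cs start index = (cs - PySem.List.pyGetD arr start 0, start + 1, r - 1) := by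
  rw [pvInnerA, dif_pos h, pvInnerA, dif_neg (by omega : ¬ r ≤ r - 1)]

theorem pvInnerA_neg (arr : List Int) (r cs start index : Int) (h : ¬ r ≤ index) :
    pvInnerA arr r cs start index = (cs, start, index) := by
  rw [pvInnerA, dif_neg h]

theorem pvLoopA_stop (arr : List Int) (t r : Int) (n : Nat) (cl : List Int) (cs st ix : Int) :
    pvLoopA arr t r n (n + 1) cl cs st ix = cl := by
  rw [pvLoopA]; simp

theorem pvS_nonpos (arr : List Int) (k : Int) (h : k ≤ 0) : pvS arr k = 0 := by
  unfold pvS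
  have : k.toNat = 0 := by omega
  simp [this]

theorem pvS_succ (arr : List Int) (k : Int) (h0 : 0 ≤ k) (hk : k < (arr.length : Int)) :
    pvS arr (k + 1) = pvS arr k + PySem.List.pyGetD arr k 0 := by
  unfold pvS
  rw [PySem.List.pyGetD_of_nonneg arr 0 h0]
  have hN : (k + 1).toNat = k.toNat + 1 := by omega
  have hlt : k.toNat < arr.length := by omega
  rw [hN, List.sum_take_succ _ _ hlt, List.getD_eq_getElem arr 0 hlt]

-- running sums appended by B's prefix loop, starting after value s
def pvSums : List Int → Int → List Int
  | [], _ => []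
  | x :: l, s => (s + x) :: pvSums l (s + x)

theorem pvPrefixB_go (l : List Int) : ∀ (p : List Int) (s : Int), p.getLast? = some s →
    l.foldl (fun p x => p ++ [PySem.List.pyGetD p (-1) 0 + x]) p = p ++ pvSums l s := by
  induction l with
  | nil => intro p s _; simp [pvSums]
  | cons x l ih =>
    intro p s hs
    have hp : p ≠ [] := by rintro rfl; simp at hs
    have hlast : PySem.List.pyGetD p (-1) 0 = s := by
      rw [PySem.List.pyGetD_neg_one p 0 hp]
      rw [List.getLast?_eq_getLast hp] at hs
      exact Option.some.inj hs
    simp only [List.foldl_cons, hlast]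
    rw [ih (p ++ [s + x]) (s + x) (by simp)]
    simp [pvSums]

theorem pvSums_getElem? (l : List Int) : ∀ (s : Int) (k : Nat), k < l.length →
    (pvSums l s)[k]? = some (s + (l.take (k + 1)).sum) := by
  induction l with
  | nil => intro s k h; simp at h
  | cons x l ih =>
    intro s k h
    cases k with
    | zero => simp [pvSums]
    | succ k =>
      have hk : k < l.length := by simpa using Nat.lt_of_succ_lt_succ h
      have := ih (s + x) k hk
      simp only [pvSums, List.getElem?_cons_succ, this, List.take_succ_cons, List.sum_cons]
      congr 1
      ring

theorem pvPrefixB_get (arr : List Int) (j : Int) (h0 : 0 ≤ j) (hj : j ≤ (arr.length : Int)) :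
    PySem.List.pyGetD (pvPrefixB arr) j 0 = pvS arr j := by
  have hpre : pvPrefixB arr = 0 :: pvSums arr 0 := by
    unfold pvPrefixB
    simpa using pvPrefixB_go arr [0] 0 (by simp)
  rw [hpre, PySem.List.pyGetD_of_nonneg _ 0 h0]
  unfold pvS
  cases hk : j.toNat with
  | zero => simp
  | succ k =>
    have hkl : k < arr.length := by omega
    have hget := pvSums_getElem? arr 0 k hkl
    simp [List.getD, hget]

theorem pvFold_noop (arr : List Int) (t r : Int) (l : List Int) :
    ∀ cl : List Int, (∀ i ∈ l, i < r) → l.foldl (pvG arr t r) cl = cl := by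
  induction l with
  | nil => intro cl _; rfl
  | cons x l ih =>
    intro cl h
    have hx : ¬ r ≤ x := by have := h x (by simp); omega
    have hG : pvG arr t r cl x = cl := by
      unfold pvG
      rw [if_neg]
      rintro ⟨h1, _⟩
      exact hx h1
    rw [List.foldl_cons, hG]
    exact ih cl (fun i hi => h i (by simp [hi]))

-- invariant of A's outer loop: at iteration i the state is determined by the window,
-- and the rest of the loop is the last-matching-window fold over [i, n]
theorem pvLoopA_main (arr : List Int) (t r : Int) (hr : 1 ≤ r) :
    ∀ (k i : Nat) (cl : List Int) (cs st ix : Int),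
      1 ≤ i → i + k = arr.length →
      ix = min (i : Int) r → st = (i : Int) - ix → cs = pvS arr (i : Int) - pvS arr st →
      pvLoopA arr t r arr.length i cl cs st ix
        = (PySem.List.pyRange (i : Int) ((arr.length : Int) + 1)).foldl (pvG arr t r) cl := by
  intro k
  induction k with
  | zero =>
    intro i cl cs st ix h1 hk hix hst hcs
    subst hix hst hcs
    have hI1 : (1 : Int) ≤ (i : Int) := by exact_mod_cast h1
    have hcl' : (if pvS arr (i : Int) - pvS arr ((i : Int) - min (i : Int) r) = t
            ∧ min (i : Int) r = r then
          PySem.List.slice arr (some ((i : Int) - r)) (some (i : Int)) else cl)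
        = pvG arr t r cl (i : Int) := by
      unfold pvG
      by_cases hri : r ≤ (i : Int)
      · have hmin : min (i : Int) r = r := min_eq_right hri
        simp only [hmin]
        split_ifs with hA hB hB <;> first | rfl | (exfalso; tauto)
      · have hmin : min (i : Int) r = (i : Int) := min_eq_left (by omega)
        have hne' : ¬((min (i : Int) r) = r) := by omega
        simp only [hmin] at hne' ⊢
        rw [if_neg (by tauto), if_neg (by rintro ⟨hA, hB⟩; omega)]
    have hnlt : ¬ ((i : Int) < (arr.length : Int)) := by omega
    rw [pvLoopA, if_pos (by omega : i ≤ arr.length)]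
    simp only [if_neg hnlt]
    rw [hcl', show i + 1 = arr.length + 1 from by omega, pvLoopA_stop,
      show ((arr.length : Int)) = (i : Int) from by omega,
      PySem.List.pyRange_one_singleton, List.foldl_cons, List.foldl_nil]
  | succ k ih =>
    intro i cl cs st ix h1 hk hix hst hcs
    subst hix hst hcs
    have hiltn : i < arr.length := by omega
    have hIn : ((i : Int)) < (arr.length : Int) := by exact_mod_cast hiltn
    have hI1 : (1 : Int) ≤ (i : Int) := by exact_mod_cast h1
    have hcl' : (if pvS arr (i : Int) - pvS arr ((i : Int) - min (i : Int) r) = t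
            ∧ min (i : Int) r = r then
          PySem.List.slice arr (some ((i : Int) - r)) (some (i : Int)) else cl)
        = pvG arr t r cl (i : Int) := by
      unfold pvG
      by_cases hri : r ≤ (i : Int)
      · have hmin : min (i : Int) r = r := min_eq_right hri
        simp only [hmin]
        split_ifs with hA hB hB <;> first | rfl | (exfalso; tauto)
      · have hmin : min (i : Int) r = (i : Int) := min_eq_left (by omega)
        have hne' : ¬((min (i : Int) r) = r) := by omega
        simp only [hmin] at hne' ⊢
        rw [if_neg (by tauto), if_neg (by rintro ⟨hA, hB⟩; omega)]
    rw [pvLoopA, if_pos (by omega : i ≤ arr.length)]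
    simp only [hcl', if_pos hIn]
    rw [PySem.List.pyRange_one_cons (by omega : (i : Int) < (arr.length : Int) + 1),
      List.foldl_cons]
    by_cases hri : r ≤ (i : Int)
    · -- window full: inner while fires once
      have hmin : min (i : Int) r = r := min_eq_right hri
      simp only [hmin]
      rw [pvInnerA_pos arr r _ _ r le_rfl]
      have hgetS := pvS_succ arr ((i : Int) - r) (by omega) (by omega)
      rw [show ((i : Int) - r + 1) = ((i : Int) + 1 - r) from by ring] at hgetS
      have hgetI := pvS_succ arr (i : Int) (by omega) hIn
      refine ih (i + 1) (pvG arr t r cl (i : Int)) _ _ _ (by omega) (by omega) ?_ ?_ ?_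
      · push_cast; omega
      · push_cast; omega
      · push_cast
        rw [show ((i : Int) - r + 1) = ((i : Int) + 1 - r) from by ring]
        omega
    · -- window still growing: inner while does not fire
      have hmin : min (i : Int) r = (i : Int) := min_eq_left (by omega)
      simp only [hmin]
      rw [pvInnerA_neg arr r _ _ _ hri]
      have hgetI := pvS_succ arr (i : Int) (by omega) hIn
      refine ih (i + 1) (pvG arr t r cl (i : Int)) _ _ _ (by omega) (by omega) ?_ ?_ ?_
      · push_cast; omega
      · push_cast; omega
      · push_cast; omega

-- equality of the two result lists
theorem pvLists_eq (arr : List Int) (t r : Int) (hne : arr ≠ []) (hr : 1 ≤ r) :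
    pvLoopA arr t r arr.length 1 [0] (PySem.List.pyGetD arr 0 0) 0 1
      = (PySem.List.pyRange r ((arr.length : Int) + 1)).foldl
          (fun result i =>
            if PySem.List.pyGetD (pvPrefixB arr) i 0
                - PySem.List.pyGetD (pvPrefixB arr) (i - r) 0 = t
            then PySem.List.slice arr (some (i - r)) (some i) else result) [0] := by
  have hn : 1 ≤ arr.length := List.length_pos_iff.mpr hne
  have hA : pvLoopA arr t r arr.length 1 [0] (PySem.List.pyGetD arr 0 0) 0 1
      = (PySem.List.pyRange 1 ((arr.length : Int) + 1)).foldl (pvG arr t r) [0] := by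
    have hcs : PySem.List.pyGetD arr 0 0 = pvS arr 1 - pvS arr 0 := by
      have h1 := pvS_succ arr 0 le_rfl (by exact_mod_cast hn)
      have h0 : pvS arr 0 = 0 := pvS_nonpos arr 0 le_rfl
      simpa [h0] using h1.symm
    have := pvLoopA_main arr t r hr (arr.length - 1) 1 [0]
      (PySem.List.pyGetD arr 0 0) 0 1 le_rfl (by omega) (by omega) (by omega)
      (by push_cast; rw [hcs])
    simpa using this
  have hB : (PySem.List.pyRange r ((arr.length : Int) + 1)).foldl
        (fun result i =>
          if PySem.List.pyGetD (pvPrefixB arr) i 0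
              - PySem.List.pyGetD (pvPrefixB arr) (i - r) 0 = t
          then PySem.List.slice arr (some (i - r)) (some i) else result) [0]
      = (PySem.List.pyRange r ((arr.length : Int) + 1)).foldl (pvG arr t r) [0] := by
    apply PySem.List.foldl_congr_mem
    intro acc x hx
    rw [PySem.List.mem_pyRange_one] at hx
    rw [pvPrefixB_get arr x (by omega) (by omega),
      pvPrefixB_get arr (x - r) (by omega) (by omega)]
    unfold pvG
    split_ifs with hA' hB' hB' <;> first | rfl | (exfalso; omega)
  rw [hA, hB]
  by_cases hcase : r ≤ (arr.length : Int) + 1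
  · rw [PySem.List.pyRange_one_append 1 r ((arr.length : Int) + 1) (by omega) hcase,
      List.foldl_append]
    congr 1
    apply pvFold_noop
    intro x hx
    rw [PySem.List.mem_pyRange_one] at hx
    omega
  · rw [PySem.List.pyRange_one_eq_nil (by omega : (arr.length : Int) + 1 ≤ r),
      List.foldl_nil]
    apply pvFold_noop
    intro x hx
    rw [PySem.List.mem_pyRange_one] at hx
    omega

-- ===== VERDICT (by name: the statement is the Claim_ definition above) =====
theorem search_contiguous_py_spec : Claim_equal_search_contiguous_py := by
  intro arr t r _ hpre
  unfold Spec_search_contiguous_py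
  obtain ⟨hne, hr⟩ := hpre
  simp only [search_contiguous_py, search_contiguous_py_alt]
  rw [pvLists_eq arr t r hne hr]
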